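-- pv_equiv track=rewrite | github.com/wxy991015/LeetCode | Medium/Minimum Split Into Subarrays With GCD Greater Than One.py | minimumSplits
-- ===== SOURCE A (Python) =====
-- from typing import List
-- from math import gcd
--
-- def minimumSplits(nums: List[int]) -> int:
--     minimum_subarrays = 0
--     start = nums[0]
--     i = 1
--     while i < len(nums):
--         temp_gcd = gcd(start, nums[i])
--         if temp_gcd == 1:
--             start = nums[i]
--             minimum_subarrays += 1
--         else:
--             start = temp_gcd
--         i += 1
--     minimum_subarrays += 1
--     return minimum_subarrays
-- ===== SOURCE B (Python) =====
-- from typing import List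
--
--
-- def _prime_factors(x):
--     """Set of prime factors of |x|; None stands for 0 (divisible by every prime)."""
--     x = abs(x)
--     if x == 0:
--         return None
--     s = set()
--     d = 2
--     while d * d <= x:
--         if x % d == 0:
--             s.add(d)
--             while x % d == 0:
--                 x //= d
--         d += 1
--     if x > 1:
--         s.add(x)
--     return s
--
--
-- def minimumSplits(nums: List[int]) -> int:
--     facs = [_prime_factors(v) for v in nums]
--     cur = facs[0]
--     count = 1
--     for f in facs[1:]:
--         if cur is None:
--             nxt = f
--         elif f is None:
--             nxt = cur
--         else:
--             nxt = cur & f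
--         if nxt is not None and not nxt:
--             count += 1
--             cur = f
--         else:
--             cur = nxt
--     return count
-- ===== Notes on version B (the rewrite author's own statement) =====
-- stated objective: alternative
-- what changed: Instead of A's running-gcd scan, B factorizes each element into its set of prime factors (trial division, None for 0) and tracks the set of primes shared by the current segment via set intersection, starting a new subarray exactly when that set becomes empty; no gcd is ever computed.
import Mathlib
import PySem

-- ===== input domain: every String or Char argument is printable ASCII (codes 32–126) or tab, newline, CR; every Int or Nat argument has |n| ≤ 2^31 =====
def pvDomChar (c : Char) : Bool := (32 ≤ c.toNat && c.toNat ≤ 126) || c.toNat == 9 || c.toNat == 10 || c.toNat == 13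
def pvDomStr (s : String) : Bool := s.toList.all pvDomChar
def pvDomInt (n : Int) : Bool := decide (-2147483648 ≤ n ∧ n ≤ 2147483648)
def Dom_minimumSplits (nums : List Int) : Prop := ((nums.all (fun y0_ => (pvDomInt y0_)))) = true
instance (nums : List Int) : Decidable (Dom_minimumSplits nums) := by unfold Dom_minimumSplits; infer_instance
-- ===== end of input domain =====

-- B replaces A's running-gcd scan by prime factorization: it computes each element's
-- set of prime factors once and tracks the set of shared primes by set intersection
-- (no gcd calls); alternative algorithm, same greedy count.


-- ===== PORT A =====
-- A's while loop: running value `start`, reset on gcd == 1, counter `acc`.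
def pvAGo (start : Int) (rest : List Int) (acc : Int) : Int :=
  match rest with
  | [] => acc + 1
  | x :: xs =>
    let g : Int := Int.gcd start x    -- math.gcd: nonnegative gcd
    if g = 1 then pvAGo x xs (acc + 1) else pvAGo g xs acc

def minimumSplits (nums : List Int) : Int :=
  match nums with
  | [] => 0          -- Python A raises IndexError on nums[0]; excluded by Pre_
  | x :: xs => pvAGo x xs 0

-- ===== PORT B =====
-- inner `while x % d == 0: x //= d` of _prime_factors; operands are nonnegative, so Nat `/`,`%`
-- are exact for Pythons `//`,`%` here (guards 2 ≤ d, 0 < x only make the recursion total; they hold at every Python iteration).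
def pvStrip (d x : Nat) : Nat :=
  if h : 2 ≤ d ∧ 0 < x ∧ x % d = 0 then pvStrip d (x / d) else x
termination_by x
decreasing_by exact Nat.div_lt_self h.2.1 h.1

theorem pvStrip_le (d x : Nat) : pvStrip d x ≤ x := by
  fun_induction pvStrip with
  | case1 x h ih => exact le_trans ih (Nat.div_le_self x d)
  | case2 => exact le_refl _

-- outer `while d * d <= x` of _prime_factors (the 2 ≤ d guard only makes it total).
def pvFacLoop (d x : Nat) (s : PySem.Set Int) : PySem.Set Int × Nat :=
  if h : 2 ≤ d ∧ d * d ≤ x then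
    if hd : x % d = 0 then pvFacLoop (d + 1) (pvStrip d x) (PySem.Set.add s (d : Int))
    else pvFacLoop (d + 1) x s
  else (s, x)
termination_by (x, x + 1 - d)
decreasing_by
  · have hx4 : 0 < x := lt_of_lt_of_le (by nlinarith [h.1]) h.2
    have : pvStrip d x < x := by
      rw [pvStrip, dif_pos ⟨h.1, hx4, hd⟩]
      exact lt_of_le_of_lt (pvStrip_le d (x / d)) (Nat.div_lt_self hx4 h.1)
    exact Prod.Lex.left _ _ this
  · have hdx : d ≤ x := le_trans (Nat.le_mul_of_pos_left d (by omega)) h.2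
    exact Prod.Lex.right _ (by omega)

-- _prime_factors: None for 0, else the set of prime factors of |z|.
def pvPrimes (z : Int) : Option (PySem.Set Int) :=
  if z.natAbs = 0 then none
  else
    let p := pvFacLoop 2 z.natAbs PySem.Set.empty
    some (if 1 < p.2 then PySem.Set.add p.1 ((p.2 : Nat) : Int) else p.1)

-- `nxt` of the loop body: None means "all primes" (came from a 0).
def pvNext (cur f : Option (PySem.Set Int)) : Option (PySem.Set Int) :=
  match cur, f with
  | none, _ => f
  | some s, none => some s
  | some s, some t => some (PySem.Set.inter s t)

-- the `for f in facs[1:]` loop.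
def pvBGo (cur : Option (PySem.Set Int)) (count : Int) (fs : List (Option (PySem.Set Int))) : Int :=
  match fs with
  | [] => count
  | f :: rest =>
    match pvNext cur f with
    | none => pvBGo none count rest
    | some l => if l = [] then pvBGo f (count + 1) rest else pvBGo (some l) count rest

def minimumSplits_alt (nums : List Int) : Int :=
  match nums.map pvPrimes with
  | [] => 0          -- Python B raises IndexError on facs[0]; excluded by Pre_
  | f :: rest => pvBGo f 1 rest

-- ===== PRECONDITION & SPEC =====
-- Both Pythons raise IndexError on the empty list (both read element 0); Pre_ excludes exactly that.
def Pre_minimumSplits (nums : List Int) : Prop := nums ≠ []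
instance (nums : List Int) : Decidable (Pre_minimumSplits nums) := by unfold Pre_minimumSplits; infer_instance
def pvWitness_minimumSplits : List Int := ([6, 10, 7, 14])

def Spec_minimumSplits (nums : List Int) (out : Int) : Prop := out = minimumSplits_alt nums
instance (nums : List Int) (out : Int) : Decidable (Spec_minimumSplits nums out) := by unfold Spec_minimumSplits; infer_instance

-- ===== CLAIM (what is proved, stated in full; the proofs are below) =====
def Claim_equal_minimumSplits : Prop := ∀ (nums : List Int), Dom_minimumSplits nums → Pre_minimumSplits nums → Spec_minimumSplits nums (minimumSplits nums)

-- ===== LEMMAS AND PROOFS =====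
-- s holds exactly the prime factors of n (as Int casts of Nat primes).
def pvChar (s : List Int) (n : Nat) : Prop :=
  ∀ q : Int, q ∈ s ↔ ∃ p : Nat, q = (p : Int) ∧ p.Prime ∧ p ∣ n

theorem pvStrip_pos (d x : Nat) (hx : 0 < x) : 0 < pvStrip d x := by
  fun_induction pvStrip with
  | case1 x h ih =>
    exact ih (Nat.div_pos (Nat.le_of_dvd h.2.1 (Nat.dvd_of_mod_eq_zero h.2.2)) (by omega))
  | case2 => exact hx

theorem pvStrip_dvd (d x : Nat) : pvStrip d x ∣ x := by
  fun_induction pvStrip with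
  | case1 x h ih => exact dvd_trans ih (Nat.div_dvd_of_dvd (Nat.dvd_of_mod_eq_zero h.2.2))
  | case2 => exact dvd_refl _

theorem pvStrip_not_dvd (d x : Nat) (hd : 2 ≤ d) : 0 < x → ¬ d ∣ pvStrip d x := by
  fun_induction pvStrip with
  | case1 x h ih =>
    intro _
    exact ih (Nat.div_pos (Nat.le_of_dvd h.2.1 (Nat.dvd_of_mod_eq_zero h.2.2)) (by omega))
  | case2 x h =>
    intro hx hdvd
    exact h ⟨hd, hx, Nat.mod_eq_zero_of_dvd hdvd⟩

theorem pvStrip_prime_dvd (d x : Nat) (p : Nat) (hp : p.Prime) (hdp : d.Prime) (hne : p ≠ d) :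
    p ∣ pvStrip d x ↔ p ∣ x := by
  fun_induction pvStrip with
  | case1 x h ih =>
    have hdx : d ∣ x := Nat.dvd_of_mod_eq_zero h.2.2
    rw [ih]
    constructor
    · intro hpd
      have := Dvd.dvd.mul_right hpd d
      rwa [Nat.div_mul_cancel hdx] at this
    · intro hpx
      have : p ∣ x / d * d := by rwa [Nat.div_mul_cancel hdx]
      rcases (Nat.Prime.dvd_mul hp).mp this with h1 | h2
      · exact h1
      · exact absurd ((Nat.prime_dvd_prime_iff_eq hp hdp).mp h2) hne
  | case2 x h => exact Iff.rfl

theorem pvFacLoop_spec (n : Nat) (d x : Nat) (s : PySem.Set Int) :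
    2 ≤ d → 0 < x → x ∣ n →
    (∀ m, 2 ≤ m → m < d → ¬ m ∣ x) →
    (∀ q : Int, q ∈ s ↔ ∃ p : Nat, q = (p : Int) ∧ p.Prime ∧ p ∣ n ∧ p < d) →
    (∀ p : Nat, p.Prime → p ∣ n → d ≤ p → p ∣ x) →
    pvChar (if 1 < (pvFacLoop d x s).2 then PySem.Set.add (pvFacLoop d x s).1 (((pvFacLoop d x s).2 : Nat) : Int) else (pvFacLoop d x s).1) n := by
  induction d, x, s using pvFacLoop.induct with
  | case1 d x s h hmod ih =>
    intro hd2 hx hxn hmin hs hbig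
    have hdx : d ∣ x := Nat.dvd_of_mod_eq_zero hmod
    -- d is prime: it is the least divisor ≥ 2 of x
    have hdp : d.Prime := by
      rw [Nat.prime_def_lt]
      refine ⟨h.1, fun m hmd hm => ?_⟩
      have hm0 : m ≠ 0 := by rintro rfl; rw [Nat.zero_dvd] at hm; omega
      by_contra hm1
      exact hmin m (by omega) hmd (hm.trans hdx)
    rw [pvFacLoop, dif_pos h, dif_pos hmod]
    refine ih (by omega) (pvStrip_pos d x hx) (dvd_trans (pvStrip_dvd d x) hxn) ?_ ?_ ?_
    · intro m h2m hmlt hmdvd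
      rcases Nat.lt_or_ge m d with hlt | hge
      · exact hmin m h2m hlt (hmdvd.trans (pvStrip_dvd d x))
      · have hmd : m = d := by omega
        subst hmd
        exact pvStrip_not_dvd m x h2m hx hmdvd
    · intro q
      rw [PySem.Set.mem_add, hs q]
      constructor
      · rintro (⟨p, rfl, hp, hpn, hplt⟩ | rfl)
        · exact ⟨p, rfl, hp, hpn, by omega⟩
        · exact ⟨d, rfl, hdp, hdx.trans hxn, by omega⟩
      · rintro ⟨p, rfl, hp, hpn, hplt⟩
        rcases Nat.lt_or_ge p d with hlt | hge
        · exact Or.inl ⟨p, rfl, hp, hpn, hlt⟩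
        · have hpd : p = d := by omega
          exact Or.inr (by rw [hpd])
    · intro p hp hpn hge
      exact (pvStrip_prime_dvd d x p hp hdp (by omega)).mpr (hbig p hp hpn (by omega))
  | case2 d x s h hmod ih =>
    intro hd2 hx hxn hmin hs hbig
    rw [pvFacLoop, dif_pos h, dif_neg hmod]
    refine ih (by omega) hx hxn ?_ ?_ ?_
    · intro m h2m hmlt hmdvd
      rcases Nat.lt_or_ge m d with hlt | hge
      · exact hmin m h2m hlt hmdvd
      · have hmd : m = d := by omega
        subst hmd
        exact hmod (Nat.mod_eq_zero_of_dvd hmdvd)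
    · intro q
      rw [hs q]
      constructor
      · rintro ⟨p, rfl, hp, hpn, hplt⟩
        exact ⟨p, rfl, hp, hpn, by omega⟩
      · rintro ⟨p, rfl, hp, hpn, hplt⟩
        refine ⟨p, rfl, hp, hpn, ?_⟩
        rcases Nat.lt_or_ge p d with hlt | hge
        · exact hlt
        · have hpd : p = d := by omega
          exact absurd (Nat.mod_eq_zero_of_dvd (hbig p hp hpn hge)) (by rw [hpd]; exact hmod)
    · intro p hp hpn hge
      exact hbig p hp hpn (by omega)
  | case3 d x s h =>
    intro hd2 hx hxn hmin hs hbig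
    have hxlt : x < d * d := by
      by_contra hge
      push Not at hge
      exact h ⟨hd2, hge⟩
    rw [pvFacLoop, dif_neg h]
    dsimp only
    by_cases hx1 : 1 < x
    · rw [if_pos hx1]
      have hxp : x.Prime := by
        by_contra hnp
        have hq := Nat.minFac_prime (by omega : x ≠ 1)
        have hqd : d ≤ x.minFac := by
          by_contra hlt
          push Not at hlt
          exact hmin _ hq.two_le hlt (Nat.minFac_dvd x)
        have hsq := Nat.minFac_sq_le_self hx hnp
        rw [pow_two] at hsq
        nlinarith
      intro q
      rw [PySem.Set.mem_add, hs q]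
      constructor
      · rintro (⟨p, rfl, hp, hpn, _⟩ | rfl)
        · exact ⟨p, rfl, hp, hpn⟩
        · exact ⟨x, rfl, hxp, hxn⟩
      · rintro ⟨p, rfl, hp, hpn⟩
        rcases Nat.lt_or_ge p d with hlt | hge
        · exact Or.inl ⟨p, rfl, hp, hpn, hlt⟩
        · have hpx : p = x := (Nat.prime_dvd_prime_iff_eq hp hxp).mp (hbig p hp hpn hge)
          exact Or.inr (by rw [hpx])
    · rw [if_neg hx1]
      have hx1' : x = 1 := by omega
      intro q
      rw [hs q]
      constructor
      · rintro ⟨p, rfl, hp, hpn, _⟩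
        exact ⟨p, rfl, hp, hpn⟩
      · rintro ⟨p, rfl, hp, hpn⟩
        refine ⟨p, rfl, hp, hpn, ?_⟩
        rcases Nat.lt_or_ge p d with hlt | hge
        · exact hlt
        · exfalso
          have hdv := hbig p hp hpn hge
          rw [hx1'] at hdv
          exact hp.ne_one (Nat.dvd_one.mp hdv)

theorem pvPrimes_spec (z : Int) (hz : z ≠ 0) :
    ∃ s, pvPrimes z = some s ∧ pvChar s z.natAbs := by
  have hn : z.natAbs ≠ 0 := Int.natAbs_ne_zero.mpr hz
  refine ⟨_, ?_, pvFacLoop_spec z.natAbs 2 z.natAbs PySem.Set.empty (le_refl 2)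
    (Nat.pos_of_ne_zero hn) (dvd_refl _) (fun m h1 h2 _ => by omega) ?_ (fun p hp hpn _ => hpn)⟩
  · rw [pvPrimes, if_neg hn]
  · intro q
    constructor
    · intro hq
      simp [PySem.Set.empty] at hq
    · rintro ⟨p, rfl, hp, _, hlt⟩
      exact absurd hp.two_le (by omega)

-- relation between A's running value and B's running factor set
def pvRel (run : Int) (cur : Option (PySem.Set Int)) : Prop :=
  (run = 0 ∧ cur = none) ∨ (run ≠ 0 ∧ ∃ s, cur = some s ∧ pvChar s run.natAbs)

theorem pvChar_empty_iff (s : List Int) (n : Nat) (hc : pvChar s n) (hn : 0 < n) :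
    s = [] ↔ n = 1 := by
  constructor
  · intro hs
    by_contra h1
    obtain ⟨p, hp, hpd⟩ := Nat.exists_prime_and_dvd h1
    have hmem := (hc (p : Int)).mpr ⟨p, rfl, hp, hpd⟩
    rw [hs] at hmem
    simp at hmem
  · intro h1
    subst h1
    rw [List.eq_nil_iff_forall_not_mem]
    intro q hq
    obtain ⟨p, rfl, hp, hpd⟩ := (hc q).mp hq
    exact hp.ne_one (Nat.dvd_one.mp hpd)

theorem pvChar_inter (s t : List Int) (a b : Nat) (hs : pvChar s a) (ht : pvChar t b) :
    pvChar (PySem.Set.inter s t) (Nat.gcd a b) := by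
  intro q
  rw [PySem.Set.mem_inter, hs q, ht q]
  constructor
  · rintro ⟨⟨p, rfl, hp, hpa⟩, ⟨p2, hq2, hp2, hpb⟩⟩
    have hpp : p2 = p := Nat.cast_inj.mp hq2.symm
    subst hpp
    exact ⟨p2, rfl, hp2, Nat.dvd_gcd hpa hpb⟩
  · rintro ⟨p, rfl, hp, hpg⟩
    exact ⟨⟨p, rfl, hp, hpg.trans (Nat.gcd_dvd_left a b)⟩,
           ⟨p, rfl, hp, hpg.trans (Nat.gcd_dvd_right a b)⟩⟩

theorem pvAB (rest : List Int) : ∀ (run : Int) (cur : Option (PySem.Set Int)) (acc : Int),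
    pvRel run cur → pvAGo run rest acc = pvBGo cur (acc + 1) (rest.map pvPrimes) := by
  induction rest with
  | nil =>
    intro run cur acc hR
    rcases hR with ⟨_, rfl⟩ | ⟨_, s, rfl, _⟩ <;> simp [pvAGo, pvBGo]
  | cons x xs ih =>
    intro run cur acc hR
    simp only [List.map]
    rcases hR with ⟨hrun0, rfl⟩ | ⟨hrun, s, rfl, hchar⟩
    · -- run = 0, cur = none
      subst hrun0
      by_cases hx : x = 0
      · subst hx
        have hp0 : pvPrimes 0 = none := by rw [pvPrimes]; rfl
        rw [hp0]
        simp only [pvAGo, pvBGo, pvNext]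
        have hg : ((Int.gcd (0 : Int) (0 : Int) : Nat) : Int) = 0 := rfl
        rw [hg, if_neg (by norm_num : (0 : Int) ≠ 1)]
        exact ih 0 none acc (Or.inl ⟨rfl, rfl⟩)
      · obtain ⟨t, hpt, hct⟩ := pvPrimes_spec x hx
        rw [hpt]
        simp only [pvAGo, pvBGo, pvNext]
        have habs : 0 < x.natAbs := Int.natAbs_pos.mpr hx
        have hemp := pvChar_empty_iff t x.natAbs hct habs
        have hg : Int.gcd 0 x = x.natAbs := by simp [Int.gcd]
        rw [hg]
        by_cases ht : t = []
        · rw [if_pos ht, if_pos (by exact_mod_cast hemp.mp ht)]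
          exact ih x (some t) (acc + 1) (Or.inr ⟨hx, t, rfl, hct⟩)
        · have hne1 : x.natAbs ≠ 1 := fun h => ht (hemp.mpr h)
          rw [if_neg ht, if_neg (by exact_mod_cast hne1)]
          refine ih ((x.natAbs : Nat) : Int) (some t) acc (Or.inr ⟨?_, t, rfl, ?_⟩)
          · exact_mod_cast habs.ne'
          · rw [Int.natAbs_natCast]
            exact hct
    · -- run ≠ 0, cur = some s
      have habs : 0 < run.natAbs := Int.natAbs_pos.mpr hrun
      have hemp := pvChar_empty_iff s run.natAbs hchar habs
      by_cases hx : x = 0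
      · subst hx
        have hp0 : pvPrimes 0 = none := by rw [pvPrimes]; rfl
        rw [hp0]
        simp only [pvAGo, pvBGo, pvNext]
        have hg : Int.gcd run 0 = run.natAbs := by simp [Int.gcd]
        rw [hg]
        by_cases hs0 : s = []
        · rw [if_pos hs0, if_pos (by exact_mod_cast hemp.mp hs0)]
          exact ih 0 none (acc + 1) (Or.inl ⟨rfl, rfl⟩)
        · have hne1 : run.natAbs ≠ 1 := fun h => hs0 (hemp.mpr h)
          rw [if_neg hs0, if_neg (by exact_mod_cast hne1)]
          refine ih ((run.natAbs : Nat) : Int) (some s) acc (Or.inr ⟨?_, s, rfl, ?_⟩)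
          · exact_mod_cast habs.ne'
          · rw [Int.natAbs_natCast]
            exact hchar
      · obtain ⟨t, hpt, hct⟩ := pvPrimes_spec x hx
        rw [hpt]
        simp only [pvAGo, pvBGo, pvNext]
        have hinter := pvChar_inter s t _ _ hchar hct
        have hgpos : 0 < Nat.gcd run.natAbs x.natAbs := Nat.gcd_pos_of_pos_left _ habs
        have hemp2 := pvChar_empty_iff _ _ hinter hgpos
        have hg : Int.gcd run x = Nat.gcd run.natAbs x.natAbs := rfl
        rw [hg]
        by_cases hie : PySem.Set.inter s t = []
        · rw [if_pos hie, if_pos (by exact_mod_cast hemp2.mp hie)]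
          exact ih x (some t) (acc + 1) (Or.inr ⟨hx, t, rfl, hct⟩)
        · have hne1 : Nat.gcd run.natAbs x.natAbs ≠ 1 := fun h => hie (hemp2.mpr h)
          rw [if_neg hie, if_neg (by exact_mod_cast hne1)]
          refine ih ((Nat.gcd run.natAbs x.natAbs : Nat) : Int) (some (PySem.Set.inter s t)) acc
            (Or.inr ⟨?_, PySem.Set.inter s t, rfl, ?_⟩)
          · exact_mod_cast hgpos.ne'
          · rw [Int.natAbs_natCast]
            exact hinter

-- ===== VERDICT (by name: the statement is the Claim_ definition above) =====
theorem minimumSplits_spec : Claim_equal_minimumSplits := by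
  intro nums _ hpre
  unfold Spec_minimumSplits minimumSplits minimumSplits_alt
  match nums with
  | [] => exact absurd rfl hpre
  | x :: xs =>
    simp only [List.map]
    refine pvAB xs x (pvPrimes x) 0 ?_
    by_cases hx : x = 0
    · exact Or.inl ⟨hx, by simp [pvPrimes, hx]⟩
    · obtain ⟨s, hs, hc⟩ := pvPrimes_spec x hx
      exact Or.inr ⟨hx, s, hs, hc⟩
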